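-- pv_equiv track=rewrite | github.com/daththeanalyst/NeuroVault | server/engram_server/insight_extractor.py | _looks_like_question
-- ===== SOURCE A (Python) =====
-- _QUESTION_STARTS = (
--     "what", "why", "how", "when", "where", "who", "which",
--     "can you", "could you", "would you", "should", "do you",
--     "does", "is there", "are there", "is it", "are you",
-- )
--
-- def _looks_like_question(sentence: str) -> bool:
--     s = sentence.strip().lower()
--     if not s:
--         return True
--     if s.endswith("?"):
--         return True
--     for starter in _QUESTION_STARTS:
--         if s.startswith(starter + " ") or s == starter:
--             return True
--     return False
-- ===== SOURCE B (Python) =====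
-- _STARTERS = frozenset([
--     "what", "why", "how", "when", "where", "who", "which",
--     "can you", "could you", "would you", "should", "do you",
--     "does", "is there", "are there", "is it", "are you",
-- ])
--
-- def _looks_like_question(sentence: str) -> bool:
--     # Single left-to-right scan: every starter match must end exactly at the
--     # first or second space of s (starters contain at most one space) or at the
--     # end of s, so test the accumulated prefix only at those points.
--     s = sentence.strip().lower()
--     if not s:
--         return True
--     if s.endswith("?"):
--         return True
--     prefix = ""
--     spaces = 0
--     for ch in s:
--         if ch == " ":
--             if prefix in _STARTERS:
--                 return True
--             spaces += 1
--             if spaces == 2: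
--                 return False
--         prefix += ch
--     return prefix in _STARTERS
-- ===== Notes on version B (the rewrite author's own statement) =====
-- stated objective: alternative
-- what changed: A runs a startswith test for each of the 17 starters against the sentence; B makes one left-to-right pass over the sentence with a prefix accumulator, testing the accumulated prefix against a frozenset of starters only at the first two spaces and at the end of the string (a starter match can only end there), returning False as soon as a second space is seen unmatched.
import Mathlib
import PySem

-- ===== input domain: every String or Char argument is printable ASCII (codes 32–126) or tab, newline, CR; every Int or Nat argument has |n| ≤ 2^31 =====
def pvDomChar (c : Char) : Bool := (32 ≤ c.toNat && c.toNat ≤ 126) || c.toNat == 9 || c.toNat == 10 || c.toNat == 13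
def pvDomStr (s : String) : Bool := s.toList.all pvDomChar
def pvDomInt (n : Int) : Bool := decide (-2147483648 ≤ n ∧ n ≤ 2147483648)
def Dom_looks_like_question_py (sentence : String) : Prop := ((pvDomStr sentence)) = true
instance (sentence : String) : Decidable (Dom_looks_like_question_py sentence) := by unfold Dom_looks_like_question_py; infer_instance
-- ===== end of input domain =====

-- B replaces A's scan over all 17 starters (a startswith per starter) by ONE
-- left-to-right pass over the sentence that tests the accumulated prefix
-- against a frozenset only at the first two spaces and at the end of the
-- string (objective: alternative; a starter match can only end there).

-- ===== PORT A =====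
-- _QUESTION_STARTS (module constant, shared: B's _STARTERS is frozenset(_QUESTION_STARTS))
def qstarts : List (List Char) :=
  ["what".toList, "why".toList, "how".toList, "when".toList, "where".toList,
   "who".toList, "which".toList, "can you".toList, "could you".toList,
   "would you".toList, "should".toList, "do you".toList, "does".toList,
   "is there".toList, "are there".toList, "is it".toList, "are you".toList]

def looks_like_question_py (sentence : String) : Bool :=
  let s := PySem.Chars.lower (PySem.Chars.strip sentence.toList)
  if s = [] then true
  else if PySem.Chars.endswith s ['?'] then true
  else qstarts.any (fun starter => PySem.Chars.startswith s (starter ++ [' ']) || s == starter)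

-- ===== PORT B =====
-- _STARTERS = frozenset(_QUESTION_STARTS)
def pvStarters : PySem.Set (List Char) := PySem.Set.ofList qstarts

-- the for-loop of B: `pre`/`spaces` are the `prefix`/`spaces` accumulators,
-- the first argument is the not-yet-consumed rest of `s`
def pvScan : List Char → List Char → Nat → Bool
  | [], pre, _ => PySem.Set.contains pvStarters pre          -- loop over: `return prefix in _STARTERS`
  | c :: rest, pre, spaces =>
    if c = ' ' then
      if PySem.Set.contains pvStarters pre then true         -- `if prefix in _STARTERS: return True`
      else if spaces + 1 = 2 then false                      -- `spaces += 1; if spaces == 2: return False`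
      else pvScan rest (pre ++ [c]) (spaces + 1)
    else pvScan rest (pre ++ [c]) spaces                     -- `prefix += ch`

def looks_like_question_py_alt (sentence : String) : Bool :=
  let s := PySem.Chars.lower (PySem.Chars.strip sentence.toList)
  if s = [] then true
  else if PySem.Chars.endswith s ['?'] then true
  else pvScan s [] 0

-- ===== PRECONDITION & SPEC =====
def Spec_looks_like_question_py (sentence : String) (out : Bool) : Prop := out = looks_like_question_py_alt sentence
instance (sentence : String) (out : Bool) : Decidable (Spec_looks_like_question_py sentence out) := by unfold Spec_looks_like_question_py; infer_instance

-- ===== CLAIM (what is proved, stated in full; the proofs are below) =====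
def Claim_equal_looks_like_question_py : Prop := ∀ (sentence : String), Dom_looks_like_question_py sentence → Spec_looks_like_question_py sentence (looks_like_question_py sentence)

-- ===== LEMMAS AND PROOFS =====

/-- A's per-starter test, abstracted over the (stripped, lowered) sentence. -/
def pvDisj (s st : List Char) : Bool :=
  PySem.Chars.startswith s (st ++ [' ']) || s == st

lemma pvStarters_eq : pvStarters = qstarts := by decide

lemma pvMarker_inj {x y a b : List Char} (hx : ' ' ∉ x) (ha : ' ' ∉ a) :
    x ++ ' ' :: y = a ++ ' ' :: b ↔ x = a ∧ y = b := by
  constructor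
  · intro h
    induction x generalizing a with
    | nil =>
      cases a with
      | nil => simpa using h
      | cons d a' =>
        simp only [List.nil_append, List.cons_append, List.cons.injEq] at h
        simp only [List.mem_cons, not_or] at ha
        exact (ha.1 h.1).elim
    | cons c x' ih =>
      cases a with
      | nil =>
        simp only [List.cons_append, List.nil_append, List.cons.injEq] at h
        simp only [List.mem_cons, not_or] at hx
        exact (hx.1 h.1.symm).elim
      | cons d a' =>
        simp only [List.cons_append, List.cons.injEq] at h
        simp only [List.mem_cons, not_or] at hx ha
        obtain ⟨h1, h2⟩ := ih hx.2 ha.2 h.2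
        simp [h.1, h1, h2]
  · rintro ⟨rfl, rfl⟩; rfl

/-- No starter-plus-space can be a prefix of a space-free string. -/
lemma pvE0 {a : List Char} (st : List Char) (ha : ' ' ∉ a) :
    PySem.Chars.startswith a (st ++ [' ']) = false := by
  cases hh : PySem.Chars.startswith a (st ++ [' ']) with
  | false => rfl
  | true =>
    obtain ⟨t, ht⟩ := (PySem.Chars.startswith_iff a (st ++ [' '])).1 hh
    exact absurd (by rw [← ht]; simp : ' ' ∈ a) ha

/-- A space-free starter matches at the first space of the sentence. -/
lemma pvE1 {x a : List Char} (t : List Char) (hx : ' ' ∉ x) (ha : ' ' ∉ a) :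
    PySem.Chars.startswith (a ++ ' ' :: t) (x ++ [' ']) = true ↔ x = a := by
  rw [PySem.Chars.startswith_iff]
  constructor
  · rintro ⟨r, hr⟩
    have : x ++ ' ' :: r = a ++ ' ' :: t := by rw [← hr]; simp
    exact ((pvMarker_inj hx ha).1 this).1
  · rintro rfl
    exact ⟨t, by simp⟩

/-- From count ≤ 1: a starter is space-free or has exactly one internal space. -/
lemma pvDecomp (st : List Char) (h : st.count ' ' ≤ 1) :
    (' ' ∉ st) ∨ ∃ u v, st = u ++ ' ' :: v ∧ ' ' ∉ u ∧ ' ' ∉ v := by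
  induction st with
  | nil => left; simp
  | cons c t ih =>
    rw [List.count_cons] at h
    by_cases hc : c = ' '
    · subst hc
      right
      refine ⟨[], t, rfl, by simp, ?_⟩
      have : t.count ' ' = 0 := by simp at h; omega
      exact List.count_eq_zero.1 this
    · have hcnt : t.count ' ' ≤ 1 := by omega
      rcases ih hcnt with h1 | ⟨u, v, rfl, hu, hv⟩
      · left; simp [h1, Ne.symm hc]
      · right; exact ⟨c :: u, v, rfl, by simp [hu, Ne.symm hc], hv⟩

/-- Per-starter test on a sentence `a ␣ b` with exactly one space. -/
lemma pvU1 {a b : List Char} (st : List Char) (hcnt : st.count ' ' ≤ 1)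
    (ha : ' ' ∉ a) (hb : ' ' ∉ b) :
    pvDisj (a ++ ' ' :: b) st = (st == a || st == a ++ ' ' :: b) := by
  apply Bool.eq_iff_iff.2
  simp only [pvDisj, Bool.or_eq_true, beq_iff_eq]
  rcases pvDecomp st hcnt with hst | ⟨u, v, rfl, hu, hv⟩
  · rw [pvE1 b hst ha]
    exact or_congr Iff.rfl eq_comm
  · have hsw : PySem.Chars.startswith (a ++ ' ' :: b) ((u ++ ' ' :: v) ++ [' ']) = false := by
      cases hh : PySem.Chars.startswith (a ++ ' ' :: b) ((u ++ ' ' :: v) ++ [' ']) with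
      | false => rfl
      | true =>
        obtain ⟨q, hq⟩ := (PySem.Chars.startswith_iff _ _).1 hh
        have heq : u ++ ' ' :: (v ++ ' ' :: q) = a ++ ' ' :: b := by rw [← hq]; simp
        have h2 := ((pvMarker_inj hu ha).1 heq).2
        exact absurd (by rw [← h2]; simp : ' ' ∈ b) hb
    rw [hsw]
    simp only [Bool.false_eq_true, false_or]
    constructor
    · intro h
      obtain ⟨h1, h2⟩ := (pvMarker_inj ha hu).1 h
      exact Or.inr (by rw [h1, h2])
    · rintro (h | h)
      · exact absurd (h ▸ (by simp : ' ' ∈ u ++ ' ' :: v)) ha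
      · exact h.symm

/-- Per-starter test on a sentence `a ␣ b ␣ r` with at least two spaces. -/
lemma pvU2 {a b : List Char} (st r : List Char) (hcnt : st.count ' ' ≤ 1)
    (ha : ' ' ∉ a) (hb : ' ' ∉ b) :
    pvDisj (a ++ ' ' :: (b ++ ' ' :: r)) st = (st == a || st == a ++ ' ' :: b) := by
  apply Bool.eq_iff_iff.2
  simp only [pvDisj, Bool.or_eq_true, beq_iff_eq]
  rcases pvDecomp st hcnt with hst | ⟨u, v, rfl, hu, hv⟩
  · rw [pvE1 (b ++ ' ' :: r) hst ha]
    constructor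
    · rintro (rfl | h)
      · exact Or.inl rfl
      · exact absurd (h ▸ (by simp : ' ' ∈ a ++ ' ' :: (b ++ ' ' :: r))) hst
    · rintro (rfl | rfl)
      · exact Or.inl rfl
      · exact absurd (by simp : ' ' ∈ a ++ ' ' :: b) hst
  · have hsw : PySem.Chars.startswith (a ++ ' ' :: (b ++ ' ' :: r)) ((u ++ ' ' :: v) ++ [' ']) = true
        ↔ u = a ∧ v = b := by
      rw [PySem.Chars.startswith_iff]
      constructor
      · rintro ⟨q, hq⟩
        have heq : u ++ ' ' :: (v ++ ' ' :: q) = a ++ ' ' :: (b ++ ' ' :: r) := by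
          rw [← hq]; simp
        obtain ⟨h1, h2⟩ := (pvMarker_inj hu ha).1 heq
        obtain ⟨h3, _⟩ := (pvMarker_inj hv hb).1 h2
        exact ⟨h1, h3⟩
      · rintro ⟨rfl, rfl⟩
        exact ⟨r, by simp⟩
    rw [hsw]
    constructor
    · rintro (⟨rfl, rfl⟩ | h)
      · exact Or.inr rfl
      · obtain ⟨_, h2⟩ := (pvMarker_inj ha hu).1 h
        exact absurd (by rw [← h2]; simp : ' ' ∈ v) hv
    · rintro (h | h)
      · exact absurd (h ▸ (by simp : ' ' ∈ u ++ ' ' :: v)) ha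
      · obtain ⟨h1, h2⟩ := (pvMarker_inj hu ha).1 h
        exact Or.inl ⟨h1, h2⟩

lemma pvAnyCongr {α : Type} {l : List α} {f g : α → Bool}
    (h : ∀ x ∈ l, f x = g x) : l.any f = l.any g := by
  induction l with
  | nil => rfl
  | cons x t ih =>
    simp only [List.any_cons, h x (by simp), ih fun y hy => h y (by simp [hy])]

lemma pvCnt : ∀ st ∈ qstarts, st.count ' ' ≤ 1 := by decide

lemma pvAnyTwo {a b : List Char} :
    (qstarts.any fun st => st == a || st == a ++ ' ' :: b)
      = (qstarts.contains a || qstarts.contains (a ++ ' ' :: b)) := by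
  apply Bool.eq_iff_iff.2
  simp only [List.any_eq_true, Bool.or_eq_true, beq_iff_eq, List.contains_eq_mem,
    decide_eq_true_eq]
  constructor
  · rintro ⟨st, hmem, rfl | rfl⟩
    · exact Or.inl hmem
    · exact Or.inr hmem
  · rintro (h | h)
    · exact ⟨a, h, Or.inl rfl⟩
    · exact ⟨_, h, Or.inr rfl⟩

lemma pvContains_set (x : List Char) :
    PySem.Set.contains pvStarters x = qstarts.contains x := by
  rw [pvStarters_eq]
  rfl

/-- Phase after the first space: prefix is `a ␣ b`, `a` already tested (not a starter). -/
lemma pvL1 : ∀ (rem b a : List Char), ' ' ∉ a → ' ' ∉ b → qstarts.contains a = false →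
    pvScan rem (a ++ ' ' :: b) 1 = qstarts.any (pvDisj (a ++ ' ' :: (b ++ rem))) := by
  intro rem
  induction rem with
  | nil =>
    intro b a ha hb hcon
    have := pvAnyCongr (fun st hst => pvU1 st (pvCnt st hst) ha hb)
    simp only [pvScan, pvContains_set, List.append_nil, this, pvAnyTwo, hcon, Bool.false_or]
  | cons c r ih =>
    intro b a ha hb hcon
    by_cases hc : c = ' '
    · subst hc
      have := pvAnyCongr (fun st hst => pvU2 st r (pvCnt st hst) ha hb)
      simp only [pvScan, pvContains_set, this, pvAnyTwo, hcon, Bool.false_or]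
      split <;> simp_all
    · have hb' : ' ' ∉ b ++ [c] := by simp [hb, Ne.symm hc]
      have := ih (b ++ [c]) a ha hb' hcon
      simp only [pvScan, if_neg hc, List.append_assoc, List.cons_append] at this ⊢
      exact this

/-- Phase before the first space: prefix `a` is space-free. -/
lemma pvL0 : ∀ (rem a : List Char), ' ' ∉ a →
    pvScan rem a 0 = qstarts.any (pvDisj (a ++ rem)) := by
  intro rem
  induction rem with
  | nil =>
    intro a ha
    have hone : ∀ st ∈ qstarts, pvDisj a st = (st == a) := by
      intro st _
      apply Bool.eq_iff_iff.2
      simp only [pvDisj, Bool.or_eq_true, beq_iff_eq, pvE0 st ha, Bool.false_eq_true,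
        false_or]
      exact eq_comm
    rw [List.append_nil, pvAnyCongr hone]
    simp only [pvScan, pvContains_set]
    apply Bool.eq_iff_iff.2
    simp only [List.any_eq_true, beq_iff_eq, List.contains_eq_mem, decide_eq_true_eq]
    constructor
    · intro h; exact ⟨a, h, rfl⟩
    · rintro ⟨st, hmem, rfl⟩; exact hmem
  | cons c r ih =>
    intro a ha
    by_cases hc : c = ' '
    · subst hc
      simp only [pvScan, pvContains_set]
      cases hcon : qstarts.contains a with
      | true =>
        have hmem : a ∈ qstarts := by simpa [List.contains_eq_mem] using hcon
        have : qstarts.any (pvDisj (a ++ ' ' :: r)) = true := by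
          rw [List.any_eq_true]
          exact ⟨a, hmem, by simp [pvDisj, (pvE1 r ha ha).2 rfl]⟩
        simp [this]
      | false =>
        have := pvL1 r [] a ha (by simp) hcon
        simpa using this
    · have ha' : ' ' ∉ a ++ [c] := by simp [ha, Ne.symm hc]
      have := ih (a ++ [c]) ha'
      simp only [pvScan, if_neg hc, List.append_assoc, List.singleton_append] at this ⊢
      exact this

-- ===== VERDICT (by name: the statement is the Claim_ definition above) =====
theorem looks_like_question_py_spec : Claim_equal_looks_like_question_py := by
  intro sentence _
  unfold Spec_looks_like_question_py looks_like_question_py looks_like_question_py_alt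
  set s := PySem.Chars.lower (PySem.Chars.strip sentence.toList) with hs
  by_cases h1 : s = []
  · simp [h1]
  · by_cases h2 : PySem.Chars.endswith s ['?']
    · simp [h1, h2]
    · have := pvL0 s [] (by simp)
      simp only [List.nil_append] at this
      simp [h1, h2, this]
      rfl
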